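-- pv_equiv track=rewrite | github.com/vantisCorp/V-AGI | src/agents/veritas.py | _detect_contradictions
-- ===== SOURCE A (Python) =====
-- from typing import Any, Dict, List, Optional, Tuple
--
-- def _detect_contradictions(sentences: List[str]) -> List[str]:
--     """Detect contradictions in sentences."""
--     # Simple contradiction detection (placeholder)
--     # In production, use semantic analysis and knowledge graphs
--
--     contradictions = []
--
--     for i, sentence1 in enumerate(sentences):
--         for sentence2 in sentences[i + 1 :]:
--             # Check for negated statements (simplified)
--             if "not" in sentence1.lower() and "not" not in sentence2.lower():
--                 # Check if they're talking about the same thing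
--                 words1 = set(sentence1.lower().split())
--                 words2 = set(sentence2.lower().split())
--
--                 # If they share significant words, might be contradiction
--                 common_words = words1.intersection(words2)
--                 if len(common_words) > 2:
--                     contradictions.append(
--                         f"Potential contradiction between: '{sentence1.strip()}' and '{sentence2.strip()}'"
--                     )
--
--     return contradictions
-- ===== SOURCE B (Python) =====
-- from typing import List
--
--
-- def _detect_contradictions(sentences: List[str]) -> List[str]:
--     """Detect contradictions via an inverted word index instead of pairwise set intersections."""
--     lowers = [s.lower() for s in sentences]
--     words = [list(dict.fromkeys(l.split())) for l in lowers]
--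
--     # inverted index: word -> ascending list of sentence indices whose word set contains it
--     index = {}
--     for j, ws in enumerate(words):
--         for w in ws:
--             index.setdefault(w, []).append(j)
--
--     out = []
--     for i, ws in enumerate(words):
--         if "not" in lowers[i]:
--             tally = {}
--             for w in ws:
--                 for j in index.get(w, []):
--                     tally[j] = tally.get(j, 0) + 1
--             for j in range(i + 1, len(sentences)):
--                 if "not" not in lowers[j] and tally.get(j, 0) > 2:
--                     out.append(
--                         f"Potential contradiction between: '{sentences[i].strip()}' and '{sentences[j].strip()}'"
--                     )
--     return out
-- ===== Notes on version B (the rewrite author's own statement) =====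
-- stated objective: faster
-- what changed: Replaces the nested pairwise set-intersection scan with an inverted index (word -> posting list of sentence indices) and a per-'not'-sentence tally of shared-word counts accumulated from posting lists, emitting candidates j>i in ascending order.
import Mathlib
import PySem

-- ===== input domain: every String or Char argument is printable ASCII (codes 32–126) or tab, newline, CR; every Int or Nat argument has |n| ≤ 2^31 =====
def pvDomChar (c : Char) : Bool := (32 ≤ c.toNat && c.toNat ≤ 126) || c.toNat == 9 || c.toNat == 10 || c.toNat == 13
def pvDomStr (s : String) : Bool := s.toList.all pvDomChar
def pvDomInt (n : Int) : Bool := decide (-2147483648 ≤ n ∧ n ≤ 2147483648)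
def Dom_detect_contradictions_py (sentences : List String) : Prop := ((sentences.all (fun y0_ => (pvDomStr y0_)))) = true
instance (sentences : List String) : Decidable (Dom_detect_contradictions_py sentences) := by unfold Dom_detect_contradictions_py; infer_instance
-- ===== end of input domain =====

-- B replaces the pairwise set-intersection double loop by an inverted word index plus a per-'not'-sentence
-- tally of shared-word counts (faster in a timing run; same return value, no mutation involved).

-- the f-string both versions build
def pvMsg (s1 s2 : String) : String :=
  PySem.Str.join "" ["Potential contradiction between: '", PySem.Str.strip s1, "' and '", PySem.Str.strip s2, "'"]

-- ===== PORT A =====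
def detect_contradictions_py (sentences : List String) : List String :=
  (PySem.List.enumerate sentences).foldl (fun contradictions p =>
    (PySem.List.slice sentences (some (p.1 + 1)) none).foldl (fun contradictions sentence2 =>
      if PySem.Str.isIn "not" (PySem.Str.lower p.2) && !(PySem.Str.isIn "not" (PySem.Str.lower sentence2)) then
        let words1 : PySem.Set String := PySem.Set.ofList (PySem.Str.split₀ (PySem.Str.lower p.2))
        let words2 : PySem.Set String := PySem.Set.ofList (PySem.Str.split₀ (PySem.Str.lower sentence2))
        let common := PySem.Set.inter words1 words2
        if 2 < common.length then contradictions ++ [pvMsg p.2 sentence2] else contradictions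
      else contradictions) contradictions) []

-- ===== PORT B =====
def detect_contradictions_py_alt (sentences : List String) : List String :=
  let lowers := sentences.map PySem.Str.lower
  let words := lowers.map (fun l => PySem.List.dedup (PySem.Str.split₀ l))
  let index : PySem.Dict String (List Int) :=
    (PySem.List.enumerate words).foldl (fun d p =>
      p.2.foldl (fun d w => PySem.Dict.modify d w [] (fun js => js ++ [p.1])) d) PySem.Dict.empty
  (PySem.List.enumerate words).foldl (fun out p =>
    if PySem.Str.isIn "not" (PySem.List.pyGetD lowers p.1 "") then
      let tally : PySem.Dict Int Int :=
        p.2.foldl (fun t w =>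
          (PySem.Dict.getD index w []).foldl
            (fun t j => PySem.Dict.insert t j (PySem.Dict.getD t j 0 + 1)) t) PySem.Dict.empty
      (PySem.List.pyRange (p.1 + 1) (PySem.List.len sentences)).foldl (fun out j =>
        if !(PySem.Str.isIn "not" (PySem.List.pyGetD lowers j "")) && decide (2 < PySem.Dict.getD tally j 0) then
          out ++ [pvMsg (PySem.List.pyGetD sentences p.1 "") (PySem.List.pyGetD sentences j "")]
        else out) out
    else out) []

-- ===== PRECONDITION & SPEC =====
def Spec_detect_contradictions_py (sentences : List String) (out : List String) : Prop := out = detect_contradictions_py_alt sentences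
instance (sentences : List String) (out : List String) : Decidable (Spec_detect_contradictions_py sentences out) := by unfold Spec_detect_contradictions_py; infer_instance

-- ===== CLAIM (what is proved, stated in full; the proofs are below) =====
def Claim_equal_detect_contradictions_py : Prop := ∀ (sentences : List String), Dom_detect_contradictions_py sentences → Spec_detect_contradictions_py sentences (detect_contradictions_py sentences)

-- ===== LEMMAS AND PROOFS =====

-- abbreviations for the two programs' per-index blocks
def pvHasNot (s : String) : Bool := PySem.Str.isIn "not" (PySem.Str.lower s)

def pvWords (s : String) : List String := PySem.Set.ofList (PySem.Str.split₀ (PySem.Str.lower s))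

def pvPredA (s1 s2 : String) : Bool :=
  (pvHasNot s1 && !pvHasNot s2) && decide (2 < (PySem.Set.inter (pvWords s1) (pvWords s2)).length)

def pvGA (ss : List String) (p : Int × String) : List String :=
  ((ss.drop (p.1 + 1).toNat).filter (pvPredA p.2)).map (fun s2 => pvMsg p.2 s2)

def pvLowers (ss : List String) : List String := ss.map PySem.Str.lower

def pvWordsL (ss : List String) : List (List String) :=
  (pvLowers ss).map (fun l => PySem.List.dedup (PySem.Str.split₀ l))

def pvIndex (ss : List String) : PySem.Dict String (List Int) :=
  (PySem.List.enumerate (pvWordsL ss)).foldl (fun d p =>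
    p.2.foldl (fun d w => PySem.Dict.modify d w [] (fun js => js ++ [p.1])) d) PySem.Dict.empty

def pvTally (ss : List String) (ws : List String) : PySem.Dict Int Int :=
  ws.foldl (fun t w =>
    (PySem.Dict.getD (pvIndex ss) w []).foldl
      (fun t j => PySem.Dict.insert t j (PySem.Dict.getD t j 0 + 1)) t) PySem.Dict.empty

def pvPredB (ss : List String) (t : PySem.Dict Int Int) (j : Int) : Bool :=
  !(PySem.Str.isIn "not" (PySem.List.pyGetD (pvLowers ss) j "")) && decide (2 < PySem.Dict.getD t j 0)

def pvGB (ss : List String) (p : Int × String) : List String :=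
  if PySem.Str.isIn "not" (PySem.List.pyGetD (pvLowers ss) p.1 "") then
    ((PySem.List.pyRange (p.1 + 1) (PySem.List.len ss)).filter
        (pvPredB ss (pvTally ss (pvWords p.2)))).map
      (fun j => pvMsg (PySem.List.pyGetD ss p.1 "") (PySem.List.pyGetD ss j ""))
  else []

-- membership in enumerate, characterised by the index
lemma pv_mem_enumerate_iff {α : Type} (xs : List α) (s : Int) (p : Int × α) :
    p ∈ PySem.List.enumerate xs s ↔ ∃ k : Nat, k < xs.length ∧ p.1 = s + k ∧ xs[k]? = some p.2 := by
  induction xs generalizing s with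
  | nil => simp [PySem.List.enumerate]
  | cons x xs ih =>
    rw [PySem.List.enumerate_cons]
    constructor
    · intro hp
      rcases List.mem_cons.1 hp with h | h
      · subst h
        exact ⟨0, by simp, by simp, by simp⟩
      · obtain ⟨k, hk, h1, h2⟩ := (ih (s + 1)).1 h
        exact ⟨k + 1, by simpa using hk, by push_cast; omega, by simpa using h2⟩
    · rintro ⟨k, hk, h1, h2⟩
      cases k with
      | zero =>
        simp only [List.getElem?_cons_zero, Option.some.injEq] at h2
        apply List.mem_cons.2
        left
        obtain ⟨pa, pb⟩ := p
        simp only [Prod.mk.injEq]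
        simp only at h1 h2
        exact ⟨by omega, h2.symm⟩
      | succ k =>
        apply List.mem_cons.2
        right
        exact (ih (s + 1)).2 ⟨k, by simpa using hk, by push_cast at h1 ⊢; omega, by simpa using h2⟩

lemma pv_enumerate_map {α β : Type} (f : α → β) (xs : List α) (s : Int) :
    PySem.List.enumerate (xs.map f) s = (PySem.List.enumerate xs s).map (fun p => (p.1, f p.2)) := by
  induction xs generalizing s with
  | nil => simp [PySem.List.enumerate]
  | cons x xs ih => simp [PySem.List.enumerate_cons, ih]

lemma pv_wordsL_eq (ss : List String) : pvWordsL ss = ss.map pvWords := by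
  simp only [pvWordsL, pvLowers, List.map_map]
  rfl

-- the inverted index: what one sentence's (deduplicated) word list contributes to c's posting list
lemma pv_idx_getD (L : List (Int × List String)) (d : PySem.Dict String (List Int)) (c : String)
    (hL : ∀ p ∈ L, p.2.Nodup) :
    (L.foldl (fun d p => p.2.foldl (fun d w => PySem.Dict.modify d w [] (fun js => js ++ [p.1])) d) d).getD c []
      = d.getD c [] ++ (L.filter (fun p => p.2.contains c)).map (·.1) := by
  induction L generalizing d with
  | nil => simp
  | cons p L ih =>
    have hinner : (p.2.foldl (fun d w => PySem.Dict.modify d w [] (fun js => js ++ [p.1])) d).getD c []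
        = d.getD c [] ++ (if c ∈ p.2 then [p.1] else []) := by
      have h1 : p.2.foldl (fun d w => PySem.Dict.modify d w [] (fun js => js ++ [p.1])) d
          = (p.2.map (fun w => (w, p.1))).foldl (fun d q => PySem.Dict.modify d q.1 [] (fun js => js ++ [q.2])) d := by
        rw [List.foldl_map]
      rw [h1, PySem.Dict.getD_foldl_modify_append]
      congr 1
      rw [List.filter_map]
      have h2 : ((fun (q : String × Int) => q.1 == c) ∘ fun w => (w, p.1)) = fun w => w == c := rfl
      rw [h2, List.filter_beq, List.Nodup.count (hL p (by simp))]
      by_cases hc : c ∈ p.2 <;> simp [hc]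
    simp only [List.foldl_cons, List.filter_cons]
    rw [ih _ (fun q hq => hL q (by simp [hq])), hinner]
    by_cases hc : c ∈ p.2 <;> simp [hc]

lemma pv_index_getD (ss : List String) (c : String) :
    (pvIndex ss).getD c []
      = ((PySem.List.enumerate (ss.map pvWords)).filter (fun q => q.2.contains c)).map (·.1) := by
  rw [pvIndex, pv_wordsL_eq, pv_idx_getD]
  · simp
  · intro p hp
    obtain ⟨k, hk, h1, h2⟩ := (pv_mem_enumerate_iff _ _ _).1 hp
    simp only [List.getElem?_map] at h2
    obtain ⟨y, hy, hyp⟩ := Option.map_eq_some_iff.1 h2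
    rw [← hyp]
    exact PySem.Set.nodup_ofList _

-- count of index j in the posting list of word c
lemma pv_count_index (ss : List String) (c : String) (j : Int) (h0 : 0 ≤ j) (hn : j.toNat < ss.length) :
    ((pvIndex ss).getD c []).count j = if c ∈ pvWords ss[j.toNat] then 1 else 0 := by
  rw [pv_index_getD]
  have hnodup : (((PySem.List.enumerate (ss.map pvWords)).filter (fun q => q.2.contains c)).map (·.1)).Nodup := by
    have hsub := (List.filter_sublist (l := PySem.List.enumerate (ss.map pvWords))
      (p := fun q => q.2.contains c)).map (·.1)
    apply hsub.nodup
    rw [PySem.List.map_fst_enumerate]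
    exact PySem.List.nodup_pyRange_one _ _
  rw [List.Nodup.count hnodup]
  have hmem : j ∈ ((PySem.List.enumerate (ss.map pvWords)).filter (fun q => q.2.contains c)).map (·.1)
      ↔ c ∈ pvWords ss[j.toNat] := by
    simp only [List.mem_map, List.mem_filter]
    constructor
    · rintro ⟨q, ⟨hq, hqc⟩, rfl⟩
      obtain ⟨k, hk, h1, h2⟩ := (pv_mem_enumerate_iff _ _ _).1 hq
      simp only [List.getElem?_map] at h2
      rw [List.getElem?_eq_getElem (by simpa using hk)] at h2
      simp only [Option.map_some, Option.some.injEq] at h2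
      have hk' : k = q.1.toNat := by omega
      subst hk'
      rw [← h2] at hqc
      simpa using hqc
    · intro hc
      refine ⟨(j, pvWords ss[j.toNat]), ⟨?_, by simpa using hc⟩, rfl⟩
      rw [pv_mem_enumerate_iff]
      refine ⟨j.toNat, by simpa using hn, by omega, ?_⟩
      simp [List.getElem?_eq_getElem (show j.toNat < (ss.map pvWords).length by simpa using hn)]
  exact if_congr hmem rfl rfl

-- the nested tally loop, as a sum of posting-list counts
lemma pv_tally_fold (ws : List String) (g : String → List Int) (t : PySem.Dict Int Int) (j : Int) :
    (ws.foldl (fun t w => (g w).foldl (fun t j' => PySem.Dict.insert t j' (PySem.Dict.getD t j' 0 + 1)) t) t).getD j 0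
      = t.getD j 0 + (ws.map (fun w => (((g w).count j : Int)))).sum := by
  induction ws generalizing t with
  | nil => simp
  | cons w ws ih =>
    simp only [List.foldl_cons, List.map_cons, List.sum_cons]
    rw [ih, PySem.Dict.getD_foldl_insert_add_one]
    ring

lemma pv_tally_getD (ss : List String) (ws : List String) (j : Int) (h0 : 0 ≤ j) (hn : j.toNat < ss.length) :
    (pvTally ss ws).getD j 0 = (ws.countP (fun w => (pvWords ss[j.toNat]).contains w) : Int) := by
  rw [pvTally, pv_tally_fold, PySem.Dict.getD_empty]
  rw [List.map_congr_left (fun w _ => by rw [pv_count_index ss w j h0 hn])]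
  rw [show (fun w => ((if w ∈ pvWords ss[j.toNat] then 1 else 0 : Nat) : Int))
      = (fun w => if ((pvWords ss[j.toNat]).contains w) = true then (1 : Int) else 0) from ?_]
  · rw [PySem.List.sum_map_ite_one_zero]
    simp only [zero_add]
  · funext w
    by_cases h : w ∈ pvWords ss[j.toNat] <;> simp [h]

-- A as a fold appending per-i blocks
lemma pv_A_eq (ss : List String) :
    detect_contradictions_py ss
      = (PySem.List.enumerate ss).foldl (fun acc p => acc ++ pvGA ss p) [] := by
  rw [detect_contradictions_py]
  apply PySem.List.foldl_congr_mem
  intro acc p hp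
  obtain ⟨k, hk, h1, h2⟩ := (pv_mem_enumerate_iff _ _ _).1 hp
  have hpos : (0 : Int) ≤ p.1 + 1 := by omega
  rw [PySem.List.slice_from _ hpos]
  rw [show (fun (acc : List String) sentence2 =>
      if (PySem.Str.isIn "not" (PySem.Str.lower p.2) && !PySem.Str.isIn "not" (PySem.Str.lower sentence2)) = true then
        let words1 : PySem.Set String := PySem.Set.ofList (PySem.Str.split₀ (PySem.Str.lower p.2))
        let words2 : PySem.Set String := PySem.Set.ofList (PySem.Str.split₀ (PySem.Str.lower sentence2))
        let common := PySem.Set.inter words1 words2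
        if 2 < common.length then acc ++ [pvMsg p.2 sentence2] else acc
      else acc)
      = fun acc sentence2 => if pvPredA p.2 sentence2 = true then acc ++ [pvMsg p.2 sentence2] else acc from ?_]
  · rw [PySem.List.foldl_append_if]
    rfl
  · funext acc s2
    simp only [pvPredA, pvHasNot, pvWords]
    by_cases hb : (PySem.Str.isIn "not" (PySem.Str.lower p.2) && !PySem.Str.isIn "not" (PySem.Str.lower s2)) = true <;>
      simp only [hb, Bool.false_and, Bool.true_and, if_true] <;> split_ifs <;> simp_all <;> omega

-- B as the same fold shape
lemma pv_B_eq (ss : List String) :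
    detect_contradictions_py_alt ss
      = (PySem.List.enumerate ss).foldl (fun acc p => acc ++ pvGB ss p) [] := by
  have hB : detect_contradictions_py_alt ss
      = (PySem.List.enumerate (pvWordsL ss)).foldl (fun out p =>
          if PySem.Str.isIn "not" (PySem.List.pyGetD (pvLowers ss) p.1 "") = true then
            (PySem.List.pyRange (p.1 + 1) (PySem.List.len ss)).foldl (fun out j =>
              if pvPredB ss (pvTally ss p.2) j = true then
                out ++ [pvMsg (PySem.List.pyGetD ss p.1 "") (PySem.List.pyGetD ss j "")]
              else out) out
          else out) [] := rfl
  rw [hB, pv_wordsL_eq, pv_enumerate_map, List.foldl_map]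
  apply PySem.List.foldl_congr_mem
  intro acc p hp
  show (if _ = true then _ else acc) = acc ++ pvGB ss p
  rw [pvGB]
  by_cases hc : PySem.Str.isIn "not" (PySem.List.pyGetD (pvLowers ss) p.1 "") = true
  · rw [if_pos hc, if_pos hc, PySem.List.foldl_append_if]
  · rw [if_neg hc, if_neg hc, List.append_nil]

-- the per-index blocks agree
lemma pv_main (ss : List String) (p : Int × String) (hp : p ∈ PySem.List.enumerate ss 0) :
    pvGA ss p = pvGB ss p := by
  obtain ⟨k, hk, h1, h2⟩ := (pv_mem_enumerate_iff _ _ _).1 hp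
  rw [List.getElem?_eq_some_iff] at h2
  obtain ⟨hk', hgetk⟩ := h2
  have h0 : 0 ≤ p.1 := by omega
  have htk : p.1.toNat = k := by omega
  have hlowp : PySem.List.pyGetD (pvLowers ss) p.1 "" = PySem.Str.lower p.2 := by
    rw [PySem.List.pyGetD_eq_getElem _ _ h0 (by simp [pvLowers]; omega)]
    simp [pvLowers, htk, hgetk]
  have hgp : PySem.List.pyGetD ss p.1 "" = p.2 := by
    rw [PySem.List.pyGetD_eq_getElem _ _ h0 (by omega)]
    simp [htk, hgetk]
  rw [pvGB, hlowp]
  have hlen : PySem.List.len ss = (ss.length : Int) := by simp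
  by_cases hn : pvHasNot p.2 = true
  · rw [if_pos (show PySem.Str.isIn "not" (PySem.Str.lower p.2) = true from hn)]
    rw [pvGA]
    have hpos : (0 : Int) ≤ p.1 + 1 := by omega
    have hdrop : ss.drop (p.1 + 1).toNat
        = (PySem.List.pyRange (p.1 + 1) (PySem.List.len ss)).map (fun j => PySem.List.pyGetD ss j "") :=
      (PySem.List.map_pyGetD_pyRange ss "" hpos).symm
    rw [hdrop, List.filter_map, List.map_map, hgp]
    have hfilter : (PySem.List.pyRange (p.1 + 1) (PySem.List.len ss)).filter
          ((pvPredA p.2) ∘ (fun j => PySem.List.pyGetD ss j ""))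
        = (PySem.List.pyRange (p.1 + 1) (PySem.List.len ss)).filter
          (pvPredB ss (pvTally ss (pvWords p.2))) := by
      apply List.filter_congr
      intro j hj
      rw [PySem.List.mem_pyRange_one, hlen] at hj
      have hj0 : 0 ≤ j := by omega
      have hjn : j.toNat < ss.length := by omega
      have hgj : PySem.List.pyGetD ss j "" = ss[j.toNat] :=
        PySem.List.pyGetD_eq_getElem _ _ hj0 (by omega)
      have hlj : PySem.List.pyGetD (pvLowers ss) j "" = PySem.Str.lower ss[j.toNat] := by
        rw [PySem.List.pyGetD_eq_getElem _ _ hj0 (by simp [pvLowers]; omega)]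
        simp [pvLowers]
      simp only [Function.comp, hgj]
      rw [pvPredA, pvPredB, hlj, pv_tally_getD ss _ j hj0 hjn, hn]
      have hinter : (PySem.Set.inter (pvWords p.2) (pvWords ss[j.toNat])).length
          = (pvWords p.2).countP (fun w => (pvWords ss[j.toNat]).contains w) := by
        rw [PySem.Set.inter, List.countP_eq_length_filter]
        simp only [PySem.Set.contains_eq_listContains]
      have hcast : (2 < ((pvWords p.2).countP (fun w => (pvWords ss[j.toNat]).contains w) : Int))
          ↔ 2 < (pvWords p.2).countP (fun w => (pvWords ss[j.toNat]).contains w) := by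
        exact_mod_cast Iff.rfl
      simp [pvHasNot, hinter]
    rw [hfilter]
    rfl
  · rw [if_neg (show ¬ PySem.Str.isIn "not" (PySem.Str.lower p.2) = true from by simpa [pvHasNot] using hn)]
    rw [pvGA, List.filter_eq_nil_iff.2 (fun s2 _ => by simp [pvPredA, hn]), List.map_nil]

-- ===== VERDICT (by name: the statement is the Claim_ definition above) =====
theorem detect_contradictions_py_spec : Claim_equal_detect_contradictions_py := by
  intro ss _
  unfold Spec_detect_contradictions_py
  rw [pv_A_eq, pv_B_eq]
  exact PySem.List.foldl_congr_mem _ _ _ _ (fun acc p hp => by rw [pv_main ss p hp])
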